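-- pv_equiv track=rewrite | github.com/A-Lin-11/Project-Euler | ex76.py | gpn
-- ===== SOURCE A (Python) =====
-- def gpn(n):
--     r = []
--     i = 1
--     k = int((3*i*i-i)/2)
--     while k <=n:
--         r.append((k,(-1)**(abs(i)-1)))
--         if i>0:
--             i = -i
--         else:
--             i = -i+1
--         k = int((3*i*i-i)/2)
--     return r
-- ===== SOURCE B (Python) =====
-- def gpn(n):
--     if n < 1:
--         return []
--
--     def count(c):
--         # largest m in [0, n+1] with (3*m*m + c*m)//2 <= n, by binary search
--         lo, hi = 0, n + 1
--         while hi - lo > 1: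
--             mid = (lo + hi) // 2
--             if (3 * mid * mid + c * mid) // 2 <= n:
--                 lo = mid
--             else:
--                 hi = mid
--         return lo
--
--     m1 = count(-1)
--     m2 = count(1)
--     plus = [((3 * m * m - m) // 2, (-1) ** (m - 1)) for m in range(1, m1 + 1)]
--     minus = [((3 * m * m + m) // 2, (-1) ** (m - 1)) for m in range(1, m2 + 1)]
--     out = []
--     for p, q in zip(plus, minus):
--         out.append(p)
--         out.append(q)
--     out.extend(plus[len(minus):])
--     return out
-- ===== Notes on version B (the rewrite author's own statement) =====
-- stated objective: alternative
-- what changed: A walks a sign-toggling index sequentially, testing each generalized pentagonal number against n until one exceeds it; B first determines the two term counts directly by binary search (O(log n) tests), then constructs the two arithmetic families as range comprehensions and interleaves them in staged passes with no threshold test during construction.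
import Mathlib
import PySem

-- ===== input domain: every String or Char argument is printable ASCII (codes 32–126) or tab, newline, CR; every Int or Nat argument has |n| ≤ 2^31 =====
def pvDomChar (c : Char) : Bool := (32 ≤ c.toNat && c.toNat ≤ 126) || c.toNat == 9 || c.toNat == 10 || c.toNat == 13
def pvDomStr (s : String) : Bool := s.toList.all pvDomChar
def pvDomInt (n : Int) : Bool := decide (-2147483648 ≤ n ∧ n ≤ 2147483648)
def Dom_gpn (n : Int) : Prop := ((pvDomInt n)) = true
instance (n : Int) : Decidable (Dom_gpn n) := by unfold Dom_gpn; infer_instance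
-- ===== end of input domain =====

-- B replaces A's sequential sign-toggling emit-until-exceed loop by: two binary searches that
-- determine the term counts first, then pure range comprehensions and an interleaving pass
-- (count-then-construct, a different decomposition; same asymptotic cost).

-- ===== PORT A =====
-- A's while loop as structural recursion on a fuel totality guard (n.toNat + 1 iterations always
-- suffice: the emitted k are strictly increasing integers in [1, n], see loopA_eq_loopC below, so
-- the guard never cuts the loop short).  Python's int((3*i*i-i)/2) equals (3*i*i-i)//2 exactly,
-- because 3*i*i-i is always even (the float division is exact on the admitted domain).
def gpnLoopA : Nat → Int → Int → List (Int × Int)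
  | 0, _, _ => []
  | fuel + 1, n, i =>
    let k := PySem.Int.floordiv (3 * i * i - i) 2
    if k ≤ n then
      (k, (-1 : Int) ^ (i.natAbs - 1)) ::
        gpnLoopA fuel n (if 0 < i then -i else -i + 1)
    else []

def gpn (n : Int) : List (Int × Int) := gpnLoopA (n.toNat + 1) n 1

-- ===== PORT B =====
-- Source B's count(c): binary search for the largest m in [0, n+1] with (3*m*m + c*m)//2 <= n.
-- Fuel totality guard: hi - lo shrinks by at least 1 per iteration and starts at n + 1,
-- so n.toNat + 1 units always suffice (see countB_ok below).
def countB : Nat → Int → Int → Int → Int → Int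
  | 0, _, _, lo, _ => lo
  | f + 1, n, c, lo, hi =>
    if hi - lo > 1 then
      let mid := PySem.Int.floordiv (lo + hi) 2
      if PySem.Int.floordiv (3 * mid * mid + c * mid) 2 ≤ n then countB f n c mid hi
      else countB f n c lo mid
    else lo

def gpn_alt (n : Int) : List (Int × Int) :=
  if n < 1 then []
  else
    let m1 := countB (n.toNat + 1) n (-1) 0 (n + 1)
    let m2 := countB (n.toNat + 1) n 1 0 (n + 1)
    let plus := (PySem.List.pyRange 1 (m1 + 1) 1).map
      (fun m => (PySem.Int.floordiv (3 * m * m - m) 2, (-1 : Int) ^ (m - 1).toNat))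
    let minus := (PySem.List.pyRange 1 (m2 + 1) 1).map
      (fun m => (PySem.Int.floordiv (3 * m * m + m) 2, (-1 : Int) ^ (m - 1).toNat))
    let out := (plus.zip minus).foldl (fun acc pq => acc ++ [pq.1, pq.2]) []
    out ++ PySem.List.slice plus (some (minus.length : Int)) none

-- ===== PRECONDITION & SPEC =====
def Spec_gpn (n : Int) (out : List (Int × Int)) : Prop := out = gpn_alt n
instance (n : Int) (out : List (Int × Int)) : Decidable (Spec_gpn n out) := by unfold Spec_gpn; infer_instance

-- ===== CLAIM (what is proved, stated in full; the proofs are below) =====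
def Claim_equal_gpn : Prop := ∀ (n : Int), Dom_gpn n → Spec_gpn n (gpn n)

-- ===== LEMMAS AND PROOFS =====

-- canonical middle form: one step per positive index m, emitting both pentagonal numbers of index m
def gpnLoopC : Nat → Int → Int → List (Int × Int)
  | 0, _, _ => []
  | fuel + 1, n, m =>
    let k1 := PySem.Int.floordiv (3 * m * m - m) 2
    if k1 > n then []
    else
      let s := (-1 : Int) ^ (m - 1).toNat
      let k2 := PySem.Int.floordiv (3 * m * m + m) 2
      if k2 > n then [(k1, s)]
      else (k1, s) :: (k2, s) :: gpnLoopC fuel n (m + 1)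

theorem stepA (f : Nat) (n i : Int) : gpnLoopA (f + 1) n i =
    (if PySem.Int.floordiv (3 * i * i - i) 2 ≤ n then
      (PySem.Int.floordiv (3 * i * i - i) 2, (-1 : Int) ^ (i.natAbs - 1)) ::
        gpnLoopA f n (if 0 < i then -i else -i + 1)
    else []) := rfl

theorem stepC (f : Nat) (n m : Int) : gpnLoopC (f + 1) n m =
    (if PySem.Int.floordiv (3 * m * m - m) 2 > n then []
    else if PySem.Int.floordiv (3 * m * m + m) 2 > n then
      [(PySem.Int.floordiv (3 * m * m - m) 2, (-1 : Int) ^ (m - 1).toNat)]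
    else
      (PySem.Int.floordiv (3 * m * m - m) 2, (-1 : Int) ^ (m - 1).toNat) ::
        (PySem.Int.floordiv (3 * m * m + m) 2, (-1 : Int) ^ (m - 1).toNat) ::
          gpnLoopC f n (m + 1)) := rfl

theorem stepCount (f : Nat) (n c lo hi : Int) : countB (f + 1) n c lo hi =
    (if hi - lo > 1 then
      (if PySem.Int.floordiv
            (3 * PySem.Int.floordiv (lo + hi) 2 * PySem.Int.floordiv (lo + hi) 2
              + c * PySem.Int.floordiv (lo + hi) 2) 2 ≤ n
        then countB f n c (PySem.Int.floordiv (lo + hi) 2) hi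
        else countB f n c lo (PySem.Int.floordiv (lo + hi) 2))
    else lo) := rfl

-- the pentagonal-number family K c m = (3m² + cm) // 2, c ∈ {-1, 1}
-- K c m ≥ m for m ≥ 0
theorem pvK_ge (c m : Int) (hc : -1 ≤ c) (hm : 0 ≤ m) :
    m ≤ PySem.Int.floordiv (3 * m * m + c * m) 2 := by
  rw [PySem.Int.floordiv_eq_ediv_of_pos (by omega)]
  have h : 2 * m ≤ 3 * m * m + c * m := by
    rcases eq_or_lt_of_le hm with h | h
    · nlinarith
    · nlinarith
  omega

-- K c is monotone on m ≥ 0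
theorem pvK_mono (c a b : Int) (hc : -1 ≤ c) (h0 : 0 ≤ a) (hab : a ≤ b) :
    PySem.Int.floordiv (3 * a * a + c * a) 2 ≤ PySem.Int.floordiv (3 * b * b + c * b) 2 := by
  rw [PySem.Int.floordiv_eq_ediv_of_pos (by omega), PySem.Int.floordiv_eq_ediv_of_pos (by omega)]
  have key : 3 * b * b + c * b - (3 * a * a + c * a) = (b - a) * (3 * (a + b) + c) := by ring
  have h : 3 * a * a + c * a ≤ 3 * b * b + c * b := by
    rcases eq_or_lt_of_le hab with h | h
    · subst h; exact le_refl _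
    · have h1 : 0 ≤ (b - a) * (3 * (a + b) + c) :=
        mul_nonneg (by omega) (by omega)
      linarith [key, h1]
  omega

-- specialized forms for the two families k1(m) = (3m²-m)//2 and k2(m) = (3m²+m)//2
theorem pvKm_mono (a b : Int) (h0 : 0 ≤ a) (hab : a ≤ b) :
    PySem.Int.floordiv (3 * a * a - a) 2 ≤ PySem.Int.floordiv (3 * b * b - b) 2 := by
  have h := pvK_mono (-1) a b (by omega) h0 hab
  have e1 : 3 * a * a + (-1) * a = 3 * a * a - a := by ring
  have e2 : 3 * b * b + (-1) * b = 3 * b * b - b := by ring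
  rw [e1, e2] at h; exact h

theorem pvKp_mono (a b : Int) (h0 : 0 ≤ a) (hab : a ≤ b) :
    PySem.Int.floordiv (3 * a * a + a) 2 ≤ PySem.Int.floordiv (3 * b * b + b) 2 := by
  have h := pvK_mono 1 a b (by omega) h0 hab
  have e1 : 3 * a * a + 1 * a = 3 * a * a + a := by ring
  have e2 : 3 * b * b + 1 * b = 3 * b * b + b := by ring
  rw [e1, e2] at h; exact h

theorem pvKm_ge (m : Int) (hm : 0 ≤ m) : m ≤ PySem.Int.floordiv (3 * m * m - m) 2 := by
  have h := pvK_ge (-1) m (by omega) hm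
  have e : 3 * m * m + (-1) * m = 3 * m * m - m := by ring
  rw [e] at h; exact h

theorem pv_pm (m : Int) (hm : 0 ≤ m) :
    PySem.Int.floordiv (3 * m * m - m) 2 ≤ PySem.Int.floordiv (3 * m * m + m) 2 := by
  rw [PySem.Int.floordiv_eq_ediv_of_pos (by omega : (0:Int) < 2),
    PySem.Int.floordiv_eq_ediv_of_pos (by omega : (0:Int) < 2)]
  have h : 3 * m * m - m ≤ 3 * m * m + m := by omega
  omega

-- k2(m+1) ≤ k1(m+2) for m ≥ 0 (the two families interleave)
theorem pv_cross (m : Int) (hm : 0 ≤ m) :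
    PySem.Int.floordiv (3 * (m + 1) * (m + 1) + (m + 1)) 2 ≤
      PySem.Int.floordiv (3 * (m + 2) * (m + 2) - (m + 2)) 2 := by
  rw [PySem.Int.floordiv_eq_ediv_of_pos (by omega : (0:Int) < 2),
    PySem.Int.floordiv_eq_ediv_of_pos (by omega : (0:Int) < 2)]
  have h : 3 * (m + 1) * (m + 1) + (m + 1) ≤ 3 * (m + 2) * (m + 2) - (m + 2) := by nlinarith
  omega

-- binary-search correctness: with the bracket invariant and enough fuel, countB returns the
-- largest m in [lo, hi) whose K-value is ≤ n
theorem countB_ok (n c : Int) : ∀ (f : Nat) (lo hi : Int), lo < hi → hi - lo ≤ (f : Int) →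
    PySem.Int.floordiv (3 * lo * lo + c * lo) 2 ≤ n →
    n < PySem.Int.floordiv (3 * hi * hi + c * hi) 2 →
    lo ≤ countB f n c lo hi ∧
      PySem.Int.floordiv (3 * countB f n c lo hi * countB f n c lo hi + c * countB f n c lo hi) 2 ≤ n ∧
      n < PySem.Int.floordiv (3 * (countB f n c lo hi + 1) * (countB f n c lo hi + 1)
            + c * (countB f n c lo hi + 1)) 2 := by
  intro f
  induction f with
  | zero => intro lo hi hlt hf _ _; exfalso; omega
  | succ f ih =>
    intro lo hi hlt hf hlo hhi
    rw [stepCount]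
    by_cases hgap : hi - lo > 1
    · rw [if_pos hgap]
      have hmid : lo < PySem.Int.floordiv (lo + hi) 2 ∧ PySem.Int.floordiv (lo + hi) 2 < hi := by
        rw [PySem.Int.floordiv_eq_ediv_of_pos (by omega)]
        omega
      by_cases hb : PySem.Int.floordiv
          (3 * PySem.Int.floordiv (lo + hi) 2 * PySem.Int.floordiv (lo + hi) 2
            + c * PySem.Int.floordiv (lo + hi) 2) 2 ≤ n
      · rw [if_pos hb]
        have h := ih (PySem.Int.floordiv (lo + hi) 2) hi hmid.2 (by omega) hb hhi
        exact ⟨by omega, h.2.1, h.2.2⟩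
      · rw [if_neg hb]
        exact ih lo (PySem.Int.floordiv (lo + hi) 2) hmid.1 (by omega) hlo (by omega)
    · rw [if_neg hgap]
      have he : hi = lo + 1 := by omega
      subst he
      exact ⟨le_refl lo, hlo, hhi⟩

-- two consecutive steps of A's loop (i = m, then i = -m) equal one step of the canonical loop C
theorem loopA_eq_loopC : ∀ (fC fA : Nat) (n m : Int), 1 ≤ m →
    n + 2 ≤ PySem.Int.floordiv (3 * m * m - m) 2 + fA → n + 2 ≤ m + fC →
    gpnLoopA fA n m = gpnLoopC fC n m := by
  intro fC
  induction fC with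
  | zero =>
    intro fA n m hm hA hB
    have hk1 : m - 1 ≤ PySem.Int.floordiv (3 * m * m - m) 2 := by
      have := pvK_ge (-1) m (by omega) (by omega)
      have e : 3 * m * m + (-1) * m = 3 * m * m - m := by ring
      rw [e] at this; omega
    have hstop : ¬ PySem.Int.floordiv (3 * m * m - m) 2 ≤ n := by omega
    cases fA with
    | zero => rfl
    | succ a => rw [stepA, if_neg hstop]; rfl
  | succ fC ih =>
    intro fA n m hm hA hB
    have hk1 : m ≤ PySem.Int.floordiv (3 * m * m - m) 2 := by
      have := pvK_ge (-1) m (by omega) (by omega)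
      have e : 3 * m * m + (-1) * m = 3 * m * m - m := by ring
      rw [e] at this; omega
    have hk2 : m ≤ PySem.Int.floordiv (3 * m * m + m) 2 := by
      have := pvK_ge 1 m (by omega) (by omega)
      have e : 3 * m * m + 1 * m = 3 * m * m + m := by ring
      rw [e] at this; omega
    have hsig : ((-1 : Int) ^ (m.natAbs - 1)) = ((-1 : Int) ^ (m - 1).toNat) := by
      have : m.natAbs - 1 = (m - 1).toNat := by omega
      rw [this]
    match fA with
    | 0 =>
      have hstop : PySem.Int.floordiv (3 * m * m - m) 2 > n := by omega
      rw [stepC, if_pos hstop]; rfl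
    | 1 =>
      have hstop : ¬ PySem.Int.floordiv (3 * m * m - m) 2 ≤ n := by omega
      rw [stepA, if_neg hstop, stepC, if_pos (by omega : PySem.Int.floordiv (3 * m * m - m) 2 > n)]
    | (b + 2) =>
      rw [stepA, stepC]
      by_cases h1 : PySem.Int.floordiv (3 * m * m - m) 2 ≤ n
      · rw [if_pos h1, if_neg (by omega : ¬ PySem.Int.floordiv (3 * m * m - m) 2 > n),
          if_pos (show (0:Int) < m by omega), stepA]
        have hk : 3 * -m * -m - -m = 3 * m * m + m := by ring
        have harg : (if 0 < -m then - -m else - -m + 1) = m + 1 := by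
          rw [if_neg (show ¬ (0:Int) < -m by omega)]; ring
        rw [hk, harg, Int.natAbs_neg, hsig]
        by_cases h2 : PySem.Int.floordiv (3 * m * m + m) 2 ≤ n
        · have hsucc : PySem.Int.floordiv (3 * m * m - m) 2 + 2 ≤
              PySem.Int.floordiv (3 * (m + 1) * (m + 1) - (m + 1)) 2 := by
            rw [PySem.Int.floordiv_eq_ediv_of_pos (by omega : (0:Int) < 2),
              PySem.Int.floordiv_eq_ediv_of_pos (by omega : (0:Int) < 2)]
            have e : 3 * (m + 1) * (m + 1) - (m + 1) = (3 * m * m - m) + (6 * m + 2) := by ring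
            rw [e]
            omega
          rw [if_pos h2, if_neg (by omega : ¬ PySem.Int.floordiv (3 * m * m + m) 2 > n),
            ih b n (m + 1) (by omega) (by omega) (by omega)]
        · rw [if_neg h2, if_pos (by omega : PySem.Int.floordiv (3 * m * m + m) 2 > n)]
      · rw [if_neg h1, if_pos (by omega : PySem.Int.floordiv (3 * m * m - m) 2 > n)]

-- B's count-then-construct expression equals the canonical loop C, given the membership
-- characterisation of the two counts
theorem inter_eq_loopC (n m1 m2 : Int)
    (h1le : ∀ m : Int, 1 ≤ m → m ≤ m1 → PySem.Int.floordiv (3 * m * m - m) 2 ≤ n)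
    (h1gt : ∀ m : Int, m1 < m → n < PySem.Int.floordiv (3 * m * m - m) 2)
    (h2le : ∀ m : Int, 1 ≤ m → m ≤ m2 → PySem.Int.floordiv (3 * m * m + m) 2 ≤ n)
    (h2gt : ∀ m : Int, m2 < m → n < PySem.Int.floordiv (3 * m * m + m) 2)
    (h21 : m2 ≤ m1) (h12 : m1 ≤ m2 + 1) :
    ∀ (f : Nat) (m : Int), 1 ≤ m → m1 + 1 - m ≤ (f : Int) →
    (((PySem.List.pyRange m (m1 + 1) 1).map
        (fun j => (PySem.Int.floordiv (3 * j * j - j) 2, (-1 : Int) ^ (j - 1).toNat))).zip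
      ((PySem.List.pyRange m (m2 + 1) 1).map
        (fun j => (PySem.Int.floordiv (3 * j * j + j) 2, (-1 : Int) ^ (j - 1).toNat)))).flatMap
        (fun pq => [pq.1, pq.2]) ++
      ((PySem.List.pyRange m (m1 + 1) 1).map
        (fun j => (PySem.Int.floordiv (3 * j * j - j) 2, (-1 : Int) ^ (j - 1).toNat))).drop
        ((PySem.List.pyRange m (m2 + 1) 1).map
          (fun j => (PySem.Int.floordiv (3 * j * j + j) 2, (-1 : Int) ^ (j - 1).toNat))).length
    = gpnLoopC f n m := by
  intro f
  induction f with
  | zero =>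
    intro m hm hf
    have hm1 : m1 + 1 ≤ m := by omega
    rw [PySem.List.pyRange_one_eq_nil hm1, PySem.List.pyRange_one_eq_nil (by omega : m2 + 1 ≤ m)]
    rfl
  | succ f ih =>
    intro m hm hf
    rw [stepC]
    by_cases hbig : m1 < m
    · rw [PySem.List.pyRange_one_eq_nil (by omega : m1 + 1 ≤ m),
        PySem.List.pyRange_one_eq_nil (by omega : m2 + 1 ≤ m),
        if_pos (h1gt m hbig)]
      rfl
    · have hmle1 : m ≤ m1 := by omega
      rw [if_neg (by have := h1le m hm hmle1; omega)]
      by_cases hmle2 : m ≤ m2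
      · rw [if_neg (by have := h2le m hm hmle2; omega)]
        rw [PySem.List.pyRange_one_cons (by omega : m < m1 + 1),
          PySem.List.pyRange_one_cons (by omega : m < m2 + 1)]
        simp only [List.map_cons, List.zip_cons_cons, List.flatMap_cons, List.length_cons,
          List.drop_succ_cons, List.cons_append, List.nil_append]
        rw [ih (m + 1) (by omega) (by omega)]
      · -- minus range empty: m2 < m ≤ m1 ≤ m2 + 1, so m = m1
        have hmm : m = m1 := by omega
        rw [if_pos (h2gt m (by omega))]
        rw [PySem.List.pyRange_one_eq_nil (by omega : m2 + 1 ≤ m)]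
        have : m1 + 1 = m + 1 := by omega
        rw [this, PySem.List.pyRange_one_singleton]
        rfl

-- ===== VERDICT (by name: the statement is the Claim_ definition above) =====
theorem gpn_spec : Claim_equal_gpn := by
  intro n _
  unfold Spec_gpn
  by_cases hn : n < 1
  · rw [gpn_alt, if_pos hn]
    show gpnLoopA (n.toNat + 1) n 1 = []
    rw [stepA, if_neg (by
      have : PySem.Int.floordiv (3 * 1 * 1 - 1 : Int) 2 = 1 := by decide
      rw [this]; omega)]
  · have hn1 : 1 ≤ n := by omega
    have hcast : ((n.toNat + 1 : Nat) : Int) = n + 1 := by omega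
    have h0 : ∀ c : Int, PySem.Int.floordiv (3 * 0 * 0 + c * 0) 2 ≤ n := by
      intro c
      have e : (3 * 0 * 0 + c * 0 : Int) = 0 := by ring
      rw [e, PySem.Int.floordiv_eq_ediv_of_pos (by omega)]
      omega
    have htop : ∀ c : Int, -1 ≤ c →
        n < PySem.Int.floordiv (3 * (n + 1) * (n + 1) + c * (n + 1)) 2 := by
      intro c hc
      have := pvK_ge c (n + 1) hc (by omega)
      omega
    obtain ⟨hm1lo, hm1le, hm1gt⟩ := countB_ok n (-1) (n.toNat + 1) 0 (n + 1)
      (by omega) (by omega) (h0 (-1)) (htop (-1) (by omega))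
    obtain ⟨hm2lo, hm2le, hm2gt⟩ := countB_ok n 1 (n.toNat + 1) 0 (n + 1)
      (by omega) (by omega) (h0 1) (htop 1 (by omega))
    set m1 := countB (n.toNat + 1) n (-1) 0 (n + 1) with hm1def
    set m2 := countB (n.toNat + 1) n 1 0 (n + 1) with hm2def
    -- restate the brackets in the k1/k2 shapes
    have hm1le' : PySem.Int.floordiv (3 * m1 * m1 - m1) 2 ≤ n := by
      have e : 3 * m1 * m1 + (-1) * m1 = 3 * m1 * m1 - m1 := by ring
      rw [e] at hm1le; exact hm1le
    have hm1gt' : n < PySem.Int.floordiv (3 * (m1 + 1) * (m1 + 1) - (m1 + 1)) 2 := by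
      have e : 3 * (m1 + 1) * (m1 + 1) + (-1) * (m1 + 1) = 3 * (m1 + 1) * (m1 + 1) - (m1 + 1) := by
        ring
      rw [e] at hm1gt; exact hm1gt
    have hm2le' : PySem.Int.floordiv (3 * m2 * m2 + m2) 2 ≤ n := by
      have e : 3 * m2 * m2 + 1 * m2 = 3 * m2 * m2 + m2 := by ring
      rw [e] at hm2le; exact hm2le
    have hm2gt' : n < PySem.Int.floordiv (3 * (m2 + 1) * (m2 + 1) + (m2 + 1)) 2 := by
      have e : 3 * (m2 + 1) * (m2 + 1) + 1 * (m2 + 1) = 3 * (m2 + 1) * (m2 + 1) + (m2 + 1) := by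
        ring
      rw [e] at hm2gt; exact hm2gt
    -- m2 ≤ m1
    have h21 : m2 ≤ m1 := by
      by_contra hcon
      have h1 := pvKm_mono (m1 + 1) m2 (by omega) (by omega)
      have h2 := pv_pm m2 (by omega)
      omega
    -- m1 ≤ m2 + 1
    have h12 : m1 ≤ m2 + 1 := by
      by_contra hcon
      have h1 := pv_cross m2 (by omega)
      have h2 := pvKm_mono (m2 + 2) m1 (by omega) (by omega)
      omega
    -- membership characterisations
    have h1le : ∀ m : Int, 1 ≤ m → m ≤ m1 → PySem.Int.floordiv (3 * m * m - m) 2 ≤ n := by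
      intro m hm hle
      have := pvKm_mono m m1 (by omega) hle
      omega
    have h1gt : ∀ m : Int, m1 < m → n < PySem.Int.floordiv (3 * m * m - m) 2 := by
      intro m hgt
      have := pvKm_mono (m1 + 1) m (by omega) (by omega)
      omega
    have h2le : ∀ m : Int, 1 ≤ m → m ≤ m2 → PySem.Int.floordiv (3 * m * m + m) 2 ≤ n := by
      intro m hm hle
      have := pvKp_mono m m2 (by omega) hle
      omega
    have h2gt : ∀ m : Int, m2 < m → n < PySem.Int.floordiv (3 * m * m + m) 2 := by
      intro m hgt
      have := pvKp_mono (m2 + 1) m (by omega) (by omega)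
      omega
    -- fuel bound: m1 ≤ n
    have hm1n : m1 ≤ n := by
      have := pvKm_ge m1 (by omega)
      omega
    -- assemble: gpn n = loopC = gpn_alt n
    have hA : gpn n = gpnLoopC (n.toNat + 1) n 1 := by
      have h1 : PySem.Int.floordiv (3 * 1 * 1 - 1 : Int) 2 = 1 := by decide
      exact loopA_eq_loopC (n.toNat + 1) (n.toNat + 1) n 1 (by omega) (by rw [h1]; omega) (by omega)
    have hB : gpn_alt n = gpnLoopC (n.toNat + 1) n 1 := by
      rw [gpn_alt, if_neg hn]
      show ((((PySem.List.pyRange 1 (m1 + 1) 1).map _).zip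
          ((PySem.List.pyRange 1 (m2 + 1) 1).map _)).foldl
            (fun acc pq => acc ++ [pq.1, pq.2]) []) ++
          PySem.List.slice ((PySem.List.pyRange 1 (m1 + 1) 1).map _)
            (some (((PySem.List.pyRange 1 (m2 + 1) 1).map _).length : Int)) none
        = gpnLoopC (n.toNat + 1) n 1
      rw [PySem.List.foldl_append_eq_flatMap, PySem.List.slice_from_natCast, List.nil_append]
      exact inter_eq_loopC n m1 m2 h1le h1gt h2le h2gt h21 h12 (n.toNat + 1) 1 (by omega) (by omega)
    rw [hA, hB]
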